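-- pv_equiv track=rewrite | github.com/wuye9036/SalviaRenderer | eflib/include/math/write_mask/write_mask.py | get_min_dim
-- ===== SOURCE A (Python) =====
-- def get_min_dim(lst):
-- 	ret = 0
-- 	for c in lst:
-- 		if c == 'x':
-- 			ret = max(ret, 1)
-- 		elif c == 'y':
-- 			ret = max(ret, 2)
-- 		elif c == 'z':
-- 			ret = max(ret, 3)
-- 		elif c == 'w':
-- 			ret = max(ret, 4)
-- 	return ret
-- ===== SOURCE B (Python) =====
-- def get_min_dim(lst):
--     for c, v in (('w', 4), ('z', 3), ('y', 2), ('x', 1)):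
--         if c in lst:
--             return v
--     return 0
-- ===== Notes on version B (the rewrite author's own statement) =====
-- stated objective: alternative
-- what changed: Replaces the forward accumulate-max scan over all elements with a short-circuiting membership search over the four swizzle characters in descending priority order, returning the priority of the first one present, else 0.
import Mathlib
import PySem

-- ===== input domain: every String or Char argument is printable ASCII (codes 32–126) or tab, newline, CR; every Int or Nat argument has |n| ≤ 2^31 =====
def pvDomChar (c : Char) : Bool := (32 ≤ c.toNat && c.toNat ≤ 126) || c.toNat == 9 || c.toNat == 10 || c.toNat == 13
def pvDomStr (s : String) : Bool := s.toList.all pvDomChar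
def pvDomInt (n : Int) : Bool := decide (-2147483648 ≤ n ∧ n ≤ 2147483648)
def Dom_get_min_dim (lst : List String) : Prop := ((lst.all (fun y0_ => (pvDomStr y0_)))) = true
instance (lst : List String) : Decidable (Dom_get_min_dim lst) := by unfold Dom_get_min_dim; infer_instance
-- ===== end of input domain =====

-- B replaces A's accumulate-max scan with a short-circuiting descending-priority membership search (alternative decomposition, same cost).
-- ===== PORT A =====
-- step for one element of A's loop: branches in source order
def pvStepA (ret : Int) (c : String) : Int :=
  if c = "x" then max ret 1
  else if c = "y" then max ret 2
  else if c = "z" then max ret 3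
  else if c = "w" then max ret 4
  else ret

def get_min_dim (lst : List String) : Int := lst.foldl pvStepA 0

-- ===== PORT B =====
-- B: first priority (w>z>y>x) whose character is in lst, else 0
def get_min_dim_alt (lst : List String) : Int :=
  if "w" ∈ lst then 4
  else if "z" ∈ lst then 3
  else if "y" ∈ lst then 2
  else if "x" ∈ lst then 1
  else 0

-- ===== PRECONDITION & SPEC =====
def Spec_get_min_dim (lst : List String) (out : Int) : Prop := out = get_min_dim_alt lst
instance (lst : List String) (out : Int) : Decidable (Spec_get_min_dim lst out) := by unfold Spec_get_min_dim; infer_instance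

-- ===== CLAIM (what is proved, stated in full; the proofs are below) =====
def Claim_equal_get_min_dim : Prop := ∀ (lst : List String), Dom_get_min_dim lst → Spec_get_min_dim lst (get_min_dim lst)

-- ===== LEMMAS AND PROOFS =====
def pvVal (c : String) : Int :=
  if c = "x" then 1 else if c = "y" then 2 else if c = "z" then 3
  else if c = "w" then 4 else 0

theorem pvStepA_eq_max (r : Int) (c : String) (hr : 0 ≤ r) : pvStepA r c = max r (pvVal c) := by
  unfold pvStepA pvVal; split_ifs <;> omega

theorem pvVal_nonneg (c : String) : 0 ≤ pvVal c := by
  unfold pvVal; split_ifs <;> omega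

theorem alt_cons (c : String) (t : List String) :
    get_min_dim_alt (c :: t) = max (pvVal c) (get_min_dim_alt t) := by
  unfold get_min_dim_alt pvVal
  simp only [List.mem_cons]
  split_ifs <;> simp_all

theorem foldl_stepA (lst : List String) : ∀ r : Int, 0 ≤ r →
    lst.foldl pvStepA r = max r (get_min_dim_alt lst) := by
  induction lst with
  | nil =>
    intro r hr
    unfold get_min_dim_alt
    simp only [List.foldl_nil, List.not_mem_nil, if_false]
    omega
  | cons c t ih =>
    intro r hr
    have h1 : 0 ≤ pvStepA r c := by
      rw [pvStepA_eq_max r c hr]; have := pvVal_nonneg c; omega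
    simp only [List.foldl_cons]
    rw [ih _ h1, pvStepA_eq_max r c hr, alt_cons]
    omega

-- ===== VERDICT (by name: the statement is the Claim_ definition above) =====
theorem get_min_dim_spec : Claim_equal_get_min_dim := by
  intro lst _
  unfold Spec_get_min_dim get_min_dim
  rw [foldl_stepA lst 0 le_rfl]
  have : 0 ≤ get_min_dim_alt lst := by
    unfold get_min_dim_alt; split_ifs <;> omega
  omega
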